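-- pv_equiv track=rewrite | github.com/tharinduangelo/6.009 | labs/lab5/lab.py | valid_neighbors
-- ===== SOURCE A (Python) =====
-- def first_coord_valid(dim, location):
--     """
--     Returns True if the first coordinate of a given location falls within first board dimension, False otherwise
--
--     >>> first_coord_valid((2,3,4), (2,1,3))
--     False
--     >>> first_coord_valid((9, 7), (7, 5))
--     True
--     """
--     return 0 <= location[0] < dim[0]
--
-- def valid_neighbors(dim, loc):
--     """
--     Parameters
--     ----------
--     dim : tuple of dimensions of board
--     loc : tuple of coordinates of location
--
--     Returns
--     -------
--     a generator object that provides all valid neighbors of location including location when iterated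
--
--     >>> {i for i in valid_neighbors((2, 3), (1,1))} == {(0, 1), (1, 2), (0, 0), (1, 1), (0, 2), (1, 0)}
--     True
--     >>> {i for i in valid_neighbors((3, 5), (2, 4))} == {(2, 3), (2, 4), (1, 3), (1, 4), (3, 4)}
--     False
--     """
--
--     # base case
--     if len(loc) == 1:
--         for i in range(-1, 2):
--             neighbor = (loc[0] + i,)
--             #check if location within board
--             if first_coord_valid(dim, neighbor): yield neighbor
--     # recursive case
--     else:
--         for sub_combinations in valid_neighbors(dim[1:], loc[1:]):
--             for i in range(-1, 2):
--                 neighbor = (loc[0] + i,) + sub_combinations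
--                 # check if location within board
--                 if first_coord_valid(dim, neighbor): yield neighbor
-- ===== SOURCE B (Python) =====
-- def valid_neighbors(dim, loc):
--     # Flat base-3 enumeration of the 3**len(loc) offset combinations instead of
--     # recursion: digit j of the counter (coordinate 0 varying fastest) gives the
--     # offset of coordinate j, so the yield order matches the recursive version.
--     for idx in range(3 ** len(loc)):
--         k = idx
--         neighbor = []
--         for c in loc:
--             neighbor.append(c + k % 3 - 1)
--             k //= 3
--         if all(0 <= v < d for v, d in zip(neighbor, dim)):
--             yield tuple(neighbor)
-- ===== Notes on version B (the rewrite author's own statement) =====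
-- stated objective: alternative
-- what changed: Replaces A's recursive per-level generator (recursion on loc with per-level head-coordinate filtering) by a single flat loop counting 0..3**len(loc)-1, decoding each counter in base 3 into the offset tuple (first coordinate fastest) and keeping the neighbor when all coordinates pass one whole-tuple bounds test.
-- outside the precondition, e.g. on valid_neighbors((2,), (1, -3)): A returns [], B returns [(0, -4), (1, -4), (0, -3), (1, -3), (0, -2), (1, -2)]
import Mathlib
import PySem

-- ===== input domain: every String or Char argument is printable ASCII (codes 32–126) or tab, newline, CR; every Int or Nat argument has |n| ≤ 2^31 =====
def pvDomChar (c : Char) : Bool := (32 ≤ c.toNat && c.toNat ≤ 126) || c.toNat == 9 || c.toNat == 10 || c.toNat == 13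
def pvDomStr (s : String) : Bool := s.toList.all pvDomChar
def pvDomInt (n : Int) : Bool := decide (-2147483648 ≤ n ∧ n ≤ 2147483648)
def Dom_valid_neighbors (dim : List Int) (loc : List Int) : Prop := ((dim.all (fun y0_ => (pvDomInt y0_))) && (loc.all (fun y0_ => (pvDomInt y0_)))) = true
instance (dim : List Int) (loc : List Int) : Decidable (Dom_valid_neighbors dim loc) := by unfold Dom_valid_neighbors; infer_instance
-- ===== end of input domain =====

-- B replaces A's recursive generator by a single flat base-3 counter loop (one pass over
-- 3^len(loc) indices with a whole-tuple validity test); same values in the same order.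

-- ===== PORT A =====
def first_coord_valid (dim : List Int) (location : List Int) : Bool :=
  -- location[0], dim[0]; none = IndexError (excluded by Pre_)
  match PySem.List.pyGet? location 0, PySem.List.pyGet? dim 0 with
  | some l, some d => decide (0 ≤ l ∧ l < d)
  | _, _ => false

def valid_neighbors : List Int → List Int → List (List Int)
  | _, [] => []          -- Python recurses forever here (RecursionError); outside Pre_
  | dim, [x] =>
    (PySem.List.pyRange (-1) 2).foldl
      (fun acc i => if first_coord_valid dim [x + i] then acc ++ [[x + i]] else acc) []
  | dim, x :: rest =>
    (valid_neighbors (PySem.List.slice dim (some 1) none) rest).foldl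
      (fun acc sub =>
        (PySem.List.pyRange (-1) 2).foldl
          (fun acc2 i =>
            if first_coord_valid dim ((x + i) :: sub) then acc2 ++ [(x + i) :: sub] else acc2)
          acc)
      []

-- ===== PORT B =====
def vnAltNeighbor (loc : List Int) (k : Int) : List Int :=
  match loc with
  | [] => []
  | c :: rest => (c + PySem.Int.mod k 3 - 1) :: vnAltNeighbor rest (PySem.Int.floordiv k 3)

def vnAllValid (dim : List Int) (nb : List Int) : Bool :=
  (nb.zip dim).all (fun p => decide (0 ≤ p.1 ∧ p.1 < p.2))

def valid_neighbors_alt (dim : List Int) (loc : List Int) : List (List Int) :=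
  (PySem.List.pyRange 0 ((3 : Int) ^ loc.length)).foldl
    (fun acc idx =>
      if vnAllValid dim (vnAltNeighbor loc idx) then acc ++ [vnAltNeighbor loc idx] else acc)
    []

-- ===== PRECONDITION & SPEC =====
-- Pre_ restricts to the natural domain (a location with no more coordinates than the board
-- has dimensions, and at least one): A raises RecursionError on empty loc, and on loc longer
-- than dim it raises IndexError on dim[0] except when short-circuiting on all-negative
-- overhanging coordinates makes it accidentally return [] on that malformed input.
def Pre_valid_neighbors (dim : List Int) (loc : List Int) : Prop :=
  loc ≠ [] ∧ loc.length ≤ dim.length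
instance (dim : List Int) (loc : List Int) : Decidable (Pre_valid_neighbors dim loc) := by
  unfold Pre_valid_neighbors; infer_instance

def pvWitness_valid_neighbors : List Int × List Int := ([2, 3], [1, 1])

def Spec_valid_neighbors (dim : List Int) (loc : List Int) (out : List (List Int)) : Prop := out = valid_neighbors_alt dim loc
instance (dim : List Int) (loc : List Int) (out : List (List Int)) : Decidable (Spec_valid_neighbors dim loc out) := by unfold Spec_valid_neighbors; infer_instance

-- ===== CLAIM (what is proved, stated in full; the proofs are below) =====
def Claim_equal_valid_neighbors : Prop := ∀ (dim : List Int) (loc : List Int), Dom_valid_neighbors dim loc → Pre_valid_neighbors dim loc → Spec_valid_neighbors dim loc (valid_neighbors dim loc)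

-- ===== LEMMAS AND PROOFS =====

-- the three candidate head coordinates of A's level, filtered by the board bound
def tri (x d : Int) : List Int :=
  [x + -1, x + 0, x + 1].filter (fun v => decide (0 ≤ v ∧ v < d))

theorem pyGet?_cons_zero (a : Int) (l : List Int) : PySem.List.pyGet? (a :: l) 0 = some a := by
  simp [pysem]

theorem A_base (d x : Int) (dt : List Int) :
    valid_neighbors (d :: dt) [x] = (tri x d).map (fun v => [v]) := by
  have hr : PySem.List.pyRange (-1) 2 = [-1, 0, 1] := by decide
  simp only [valid_neighbors, hr, first_coord_valid, List.foldl, pyGet?_cons_zero,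
    tri, List.filter_cons, List.filter_nil]
  split_ifs <;> simp

theorem A_step (d x : Int) (dt rest : List Int) (hr : rest ≠ []) :
    valid_neighbors (d :: dt) (x :: rest) =
      (valid_neighbors dt rest).flatMap (fun sub => (tri x d).map (fun v => v :: sub)) := by
  obtain ⟨r0, rs, rfl⟩ := List.exists_cons_of_ne_nil hr
  have hR : PySem.List.pyRange (-1) 2 = [-1, 0, 1] := by decide
  have hslice : PySem.List.slice (d :: dt) (some 1) none = dt := by simp [pysem]
  show (valid_neighbors (PySem.List.slice (d :: dt) (some 1) none) (r0 :: rs)).foldl _ [] = _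
  rw [hslice]
  rw [PySem.List.foldl_congr_mem _ _
      (fun acc sub => acc ++ (tri x d).map (fun v => v :: sub)) _ ?_]
  · exact PySem.List.foldl_append_eq_flatMap _ _ _
  · intro acc sub _
    simp only [hR, List.foldl, first_coord_valid, pyGet?_cons_zero,
      tri, List.filter_cons, List.filter_nil]
    split_ifs <;> simp

theorem vn_alt_digit (x q : Int) (rest : List Int) (r : Int) (h0 : 0 ≤ r) (h3 : r < 3) :
    vnAltNeighbor (x :: rest) (3 * q + r) = (x + r - 1) :: vnAltNeighbor rest q := by
  have hd : PySem.Int.floordiv (3 * q + r) 3 = q := by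
    rw [PySem.Int.floordiv_eq_iff_of_pos (by omega)]; omega
  have hm : PySem.Int.mod (3 * q + r) 3 = r := by
    have := PySem.Int.floordiv_mul_add_mod (3 * q + r) 3
    rw [hd] at this; omega
  simp only [vnAltNeighbor]
  rw [hd, hm]

theorem range_triple (m : Nat) :
    PySem.List.pyRange 0 (3 * (m : Int)) =
      (PySem.List.pyRange 0 (m : Int)).flatMap (fun q => [3 * q, 3 * q + 1, 3 * q + 2]) := by
  induction m with
  | zero => decide
  | succ n ih =>
    have h1 : (3 : Int) * ((n + 1 : Nat) : Int) = (3 * (n : Int) + 1) + 1 + 1 := by push_cast; ring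
    have h2 : ((n + 1 : Nat) : Int) = (n : Int) + 1 := by push_cast; ring
    rw [h1, PySem.List.pyRange_one_succ_right (by omega),
        PySem.List.pyRange_one_succ_right (by omega),
        PySem.List.pyRange_one_succ_right (by positivity), ih,
        h2, PySem.List.pyRange_one_succ_right (by positivity)]
    have h3 : (3 : Int) * (n : Int) + 1 + 1 = 3 * (n : Int) + 2 := by ring
    rw [h3]
    simp [List.flatMap_append]

theorem B_nil (dt : List Int) : valid_neighbors_alt dt [] = [[]] := by
  simp [valid_neighbors_alt, vnAltNeighbor, vnAllValid]

theorem B_flat (dim loc : List Int) :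
    valid_neighbors_alt dim loc =
      (PySem.List.pyRange 0 ((3 : Int) ^ loc.length)).flatMap
        (fun idx => if vnAllValid dim (vnAltNeighbor loc idx) then [vnAltNeighbor loc idx] else []) := by
  unfold valid_neighbors_alt
  rw [PySem.List.foldl_congr_mem _ _
      (fun acc idx => acc ++ (if vnAllValid dim (vnAltNeighbor loc idx) then [vnAltNeighbor loc idx] else [])) _
      (by intro acc idx _; split <;> simp_all)]
  simp only [PySem.List.foldl_append_eq_flatMap, List.nil_append]

theorem B_step (d x : Int) (dt rest : List Int) :
    valid_neighbors_alt (d :: dt) (x :: rest) =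
      (valid_neighbors_alt dt rest).flatMap (fun sub => (tri x d).map (fun v => v :: sub)) := by
  rw [B_flat (d :: dt) (x :: rest), B_flat dt rest]
  have hpn : ((3 : Int) ^ rest.length) = ((3 ^ rest.length : Nat) : Int) := by push_cast; ring
  have hpow : ((3 : Int) ^ (x :: rest).length) = 3 * ((3 ^ rest.length : Nat) : Int) := by
    rw [← hpn]; simp [List.length_cons]; ring
  rw [hpow, range_triple, ← hpn, List.flatMap_assoc, List.flatMap_assoc]
  apply List.flatMap_congr
  intro q _
  have d0 : vnAltNeighbor (x :: rest) (3 * q) = (x + -1) :: vnAltNeighbor rest q := by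
    have h := vn_alt_digit x q rest 0 (by omega) (by omega)
    rw [show (3:Int) * q + 0 = 3 * q by ring, show x + 0 - 1 = x + -1 by ring] at h
    exact h
  have d1 : vnAltNeighbor (x :: rest) (3 * q + 1) = (x + 0) :: vnAltNeighbor rest q := by
    have h := vn_alt_digit x q rest 1 (by omega) (by omega)
    rw [show x + 1 - 1 = x + 0 by ring] at h
    exact h
  have d2 : vnAltNeighbor (x :: rest) (3 * q + 2) = (x + 1) :: vnAltNeighbor rest q := by
    have h := vn_alt_digit x q rest 2 (by omega) (by omega)
    rw [show x + 2 - 1 = x + 1 by ring] at h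
    exact h
  simp only [List.flatMap_cons, List.flatMap_nil, List.append_nil, d0, d1, d2]
  simp only [vnAllValid, List.zip_cons_cons, List.all_cons, tri,
    List.filter_cons, List.filter_nil]
  by_cases hsub : (List.zip (vnAltNeighbor rest q) dt).all (fun p => decide (0 ≤ p.1 ∧ p.1 < p.2)) = true
  · simp only [hsub, Bool.and_true]
    split_ifs <;> simp
  · have hb : (((vnAltNeighbor rest q).zip dt).all fun p => decide (0 ≤ p.1 ∧ p.1 < p.2)) = false := by
      simpa using hsub
    simp only [hb, Bool.and_false]
    simp

theorem main_equiv : ∀ (loc dim : List Int), loc ≠ [] → loc.length ≤ dim.length →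
    valid_neighbors dim loc = valid_neighbors_alt dim loc := by
  intro loc
  induction loc with
  | nil => intro _ h; exact absurd rfl h
  | cons x rest ih =>
    intro dim _ hlen
    cases dim with
    | nil => simp at hlen
    | cons d dt =>
      cases rest with
      | nil =>
        rw [A_base, B_step, B_nil]; simp
      | cons r0 rs =>
        rw [A_step d x dt (r0 :: rs) (by simp), B_step,
            ih dt (by simp) (by simpa using hlen)]

-- ===== VERDICT (by name: the statement is the Claim_ definition above) =====
theorem valid_neighbors_spec : Claim_equal_valid_neighbors := by
  intro dim loc _ hpre
  unfold Spec_valid_neighbors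
  exact main_equiv loc dim hpre.1 hpre.2
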